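-- pv_equiv track=rewrite | github.com/NJiHyeon/Algorithm_Study | 프로그래머스/1/135808. 과일 장수/과일 장수.py | solution
-- ===== SOURCE A (Python) =====
-- def solution(k, m, score):
--     score.sort(reverse=True)
--     box = []
--     l = len(score)
--     for i in range(0, l+1, m) :
--         box.append(score[i:i+m])
--
--     total = 0
--     for b in box :
--         if len(b) == m :
--             total += m*min(b)
--
--     return total
-- ===== SOURCE B (Python) =====
-- def solution(k, m, score):
--     score.sort(reverse=True)
--     return sum(m * score[j] for j in range(m - 1, len(score), m))
-- ===== Notes on version B (the rewrite author's own statement) =====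
-- stated objective: simpler
-- what changed: Instead of materialising a list of m-sized slices and running min() over each box, B sorts descending and directly sums m*score[j] for j = m-1, 2m-1, ..., reading each full box's minimum by index in a single range pass.
import Mathlib
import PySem

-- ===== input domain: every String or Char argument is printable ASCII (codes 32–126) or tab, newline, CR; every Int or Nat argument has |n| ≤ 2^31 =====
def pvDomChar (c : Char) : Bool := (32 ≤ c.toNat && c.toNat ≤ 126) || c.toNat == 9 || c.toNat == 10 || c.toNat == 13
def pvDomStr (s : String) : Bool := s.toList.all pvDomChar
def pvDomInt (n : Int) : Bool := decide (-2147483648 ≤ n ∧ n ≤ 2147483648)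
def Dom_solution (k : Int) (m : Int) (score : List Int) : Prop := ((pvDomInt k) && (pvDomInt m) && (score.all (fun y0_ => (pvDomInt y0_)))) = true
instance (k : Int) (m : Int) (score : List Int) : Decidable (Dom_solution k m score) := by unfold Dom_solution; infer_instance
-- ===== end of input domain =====

-- B replaces A's build-all-slices-then-min-each-box pass by one direct indexed sum:
-- in the descending-sorted list the minimum of the full box starting at i is score[i+m-1].
-- (Both A and B sort `score` in place; the equivalence proved is about the return value.)


-- ===== PORT A =====
-- min(b) is guarded by len(b) == m; under Pre_ (m ≠ 0) the guard implies b ≠ [], so the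
-- `.getD 0` default of min? is never used.
def solution (k : Int) (m : Int) (score : List Int) : Int :=
  let s := PySem.List.sorted score (fun x => x) true
  let l : Int := s.length
  let box := (PySem.List.pyRange 0 (l + 1) m).foldl
    (fun acc i => acc ++ [PySem.List.slice s (some i) (some (i + m))]) ([] : List (List Int))
  box.foldl
    (fun total b =>
      if (b.length : Int) = m then total + m * ((PySem.List.min? b (fun x => x)).getD 0)
      else total) 0

-- ===== PORT B =====
-- score[j] with j drawn from range(m-1, len(score), m): every such j is in range, so the
-- default of pyGetD is never used.
def solution_alt (k : Int) (m : Int) (score : List Int) : Int :=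
  let s := PySem.List.sorted score (fun x => x) true
  (PySem.List.pyRange (m - 1) (s.length : Int) m).foldl
    (fun acc j => acc + m * PySem.List.pyGetD s j 0) 0

-- ===== PRECONDITION & SPEC =====
-- Pre_ excludes exactly m = 0, where A raises ValueError (range() with step 0); B raises there too.
def Pre_solution (k : Int) (m : Int) (score : List Int) : Prop := m ≠ 0
instance (k : Int) (m : Int) (score : List Int) : Decidable (Pre_solution k m score) := by unfold Pre_solution; infer_instance

def pvWitness_solution : Int × Int × List Int := (4, 3, [1, 2, 3, 1, 2, 3, 1])

def Spec_solution (k : Int) (m : Int) (score : List Int) (out : Int) : Prop := out = solution_alt k m score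
instance (k : Int) (m : Int) (score : List Int) (out : Int) : Decidable (Spec_solution k m score out) := by unfold Spec_solution; infer_instance

-- ===== CLAIM (what is proved, stated in full; the proofs are below) =====
def Claim_equal_solution : Prop := ∀ (k : Int) (m : Int) (score : List Int), Dom_solution k m score → Pre_solution k m score → Spec_solution k m score (solution k m score)

-- ===== LEMMAS AND PROOFS =====

-- range() with a negative step and start ≤ stop is empty.
lemma pyRange_nil_of_neg (a b step : Int) (hs : step < 0) (hab : a ≤ b) :
    PySem.List.pyRange a b step = [] := by
  simp [PySem.List.pyRange, hs.ne, not_lt.mpr hab, not_lt.mpr hs.le]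

-- In a descending-sorted list, values at later indices are ≤ values at earlier indices.
lemma desc_getD_le (s : List Int) (hs : s.Pairwise (· ≥ ·)) {p q : Nat}
    (hpq : p ≤ q) (hq : q < s.length) : s.getD q 0 ≤ s.getD p 0 := by
  rcases Nat.lt_or_ge p q with h | h
  · have := (List.pairwise_iff_getElem.mp hs) p q (lt_of_le_of_lt hpq hq) hq h
    simpa [List.getD_eq_getElem, hq, lt_of_le_of_lt hpq hq] using this
  · have : p = q := le_antisymm hpq h
    subst this; exact le_refl _

lemma slice_getElem (s : List Int) (a b : Nat) (hle : a + b ≤ s.length) (p : Nat) (hp : p < b) :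
    ((s.drop a).take b)[p]'(by simp; omega) = s.getD (a+p) 0 := by
  rw [List.getD_eq_getElem s 0 (by omega)]
  simp [List.getElem_take, List.getElem_drop]

-- Minimum of a full box: in a descending list the min of (s.drop a).take b is s[a+b-1].
lemma min_slice_desc (s : List Int) (hs : s.Pairwise (· ≥ ·)) (a b : Nat)
    (hb : 1 ≤ b) (hle : a + b ≤ s.length) :
    PySem.List.min? ((s.drop a).take b) (fun x => x) = some (s.getD (a + b - 1) 0) := by
  have hlen : ((s.drop a).take b).length = b := by simp; omega
  obtain ⟨mn, hmn⟩ : ∃ mn, PySem.List.min? ((s.drop a).take b) (fun x => x) = some mn := by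
    cases h : PySem.List.min? ((s.drop a).take b) (fun x => x) with
    | none =>
        exfalso
        have hcon := (PySem.List.min?_eq_none_iff _ _).mp h
        rw [hcon] at hlen; simp at hlen; omega
    | some v => exact ⟨v, rfl⟩
  have hmem := PySem.List.min?_mem hmn
  have hmin := PySem.List.min?_isMin hmn
  have hlast_mem : s.getD (a + b - 1) 0 ∈ (s.drop a).take b := by
    have := slice_getElem s a b hle (b-1) (by omega)
    rw [List.mem_iff_getElem]
    exact ⟨b-1, by omega, by rw [this]; congr 1; omega⟩
  rw [hmn]
  congr 1
  apply le_antisymm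
  · exact hmin _ hlast_mem
  · obtain ⟨p, hp, hpe⟩ := List.mem_iff_getElem.mp hmem
    rw [hlen] at hp
    rw [slice_getElem s a b hle p hp] at hpe
    rw [← hpe]
    exact desc_getD_le s hs (by omega) (by omega)

-- range(0, l+1, m) for m = cm ≥ 1 enumerates the box starts 0, cm, …, cm·(l/cm).
lemma rangeA (cm L : Nat) (h1 : 1 ≤ cm) :
    PySem.List.pyRange 0 ((L : Int) + 1) (cm : Int)
      = (List.range (L / cm + 1)).map (fun j => ((cm * j : Nat) : Int)) := by
  rw [PySem.List.pyRange_of_pos _ _ (by exact_mod_cast h1)]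
  have hcnt : (((L:Int) + 1 - 0 + cm - 1) / cm).toNat = L / cm + 1 := by
    have h2 : ((L:Int) + 1 - 0 + cm - 1) = ((L + cm : Nat) : Int) := by push_cast; ring
    rw [h2, Int.ofNat_ediv_ofNat, Int.toNat_natCast, Nat.add_div_right _ h1]
  rw [if_pos (by positivity), hcnt]
  apply List.map_congr_left
  intro j _
  push_cast; ring

-- range(m-1, l, m) for m = cm ≥ 1 enumerates the box minima indices cm-1, 2cm-1, ….
lemma rangeB (cm L : Nat) (h1 : 1 ≤ cm) :
    PySem.List.pyRange ((cm : Int) - 1) (L : Int) (cm : Int)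
      = (List.range (L / cm)).map (fun j => ((cm - 1 + cm * j : Nat) : Int)) := by
  rw [PySem.List.pyRange_of_pos _ _ (by exact_mod_cast h1)]
  by_cases h : (cm : Int) - 1 < L
  · have hcnt : (((L:Int) - ((cm:Int) - 1) + cm - 1) / cm).toNat = L / cm := by
      have h2 : ((L:Int) - ((cm:Int)-1) + cm - 1) = (L : Int) := by ring
      rw [h2, Int.ofNat_ediv_ofNat, Int.toNat_natCast]
    rw [if_pos h, hcnt]
    apply List.map_congr_left
    intro j _
    push_cast; omega
  · have hL : L < cm := by omega
    rw [if_neg h]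
    simp [Nat.div_eq_of_lt (by omega : L < cm)]

lemma main_pos (k m : Int) (score : List Int) (hm : 0 < m) :
    solution k m score = solution_alt k m score := by
  unfold solution solution_alt
  obtain ⟨cm, rfl⟩ : ∃ cm : Nat, m = (cm : Int) := ⟨m.toNat, (Int.toNat_of_nonneg hm.le).symm⟩
  have h1 : 1 ≤ cm := by exact_mod_cast hm
  set s := PySem.List.sorted score (fun x => x) true with hs_def
  set n := s.length / cm with hn_def
  simp only []
  rw [PySem.List.foldl_append_singleton_eq_map, List.nil_append]
  rw [rangeA cm s.length h1, rangeB cm s.length h1, ← hn_def]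
  rw [List.foldl_map, List.foldl_map]
  have hnm : cm * n ≤ s.length := by
    rw [hn_def, mul_comm]; exact Nat.div_mul_le_self s.length cm
  have hLlt : s.length < cm * n + cm := by
    have h3 := Nat.div_add_mod s.length cm
    rw [← hn_def] at h3
    have h4 := Nat.mod_lt s.length (show 0 < cm by omega)
    omega
  have hdesc : s.Pairwise (· ≥ ·) := PySem.List.sorted_pairwise_rev score (fun x => x)
  have hstep : ∀ (acc : Int), ∀ j ∈ List.range (n+1),
      (if (((PySem.List.slice s (some ((cm * j : Nat) : Int)) (some (((cm * j : Nat) : Int) + (cm:Int)))) : List Int).length : Int) = (cm:Int)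
        then acc + (cm:Int) * ((PySem.List.min? (PySem.List.slice s (some ((cm * j : Nat) : Int)) (some (((cm * j : Nat) : Int) + (cm:Int)))) (fun x => x)).getD 0)
        else acc)
      = acc + (if j < n then (cm:Int) * s.getD (cm - 1 + cm * j) 0 else 0) := by
    intro acc j hj
    rw [PySem.List.slice_natCast_add s (cm*j) cm]
    rcases Nat.lt_or_ge j n with hjn | hjn
    · have hfull : cm * j + cm ≤ s.length := by
        have h5 : cm * (j + 1) ≤ cm * n := Nat.mul_le_mul_left _ (by omega)
        have h6 : cm * j + cm = cm * (j + 1) := by ring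
        omega
      have hlen : ((s.drop (cm*j)).take cm).length = cm := by
        simp; omega
      rw [if_pos (by rw [hlen]), min_slice_desc s hdesc (cm*j) cm (by omega) hfull]
      rw [if_pos hjn]
      simp only [Option.getD_some]
      have hidx : cm * j + cm - 1 = cm - 1 + cm * j := by omega
      rw [hidx]
    · have hj' : j = n := by simp at hj; omega
      subst hj'
      have hlen : ((s.drop (cm*n)).take cm).length = s.length - cm * n := by
        simp; omega
      have hguard : ¬((((s.drop (cm*n)).take cm).length : Int) = (cm:Int)) := by
        rw [hlen]
        have : s.length - cm * n < cm := by omega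
        omega
      rw [if_neg hguard, if_neg (by omega)]
      simp
  rw [PySem.List.foldl_congr_mem _ _
    (fun acc j => acc + if j < n then ((cm:Int)) * s.getD (cm - 1 + cm*j) 0 else 0) _ hstep]
  have hstepB : ∀ (acc : Int), ∀ j ∈ List.range n,
      acc + (cm:Int) * PySem.List.pyGetD s ((cm - 1 + cm * j : Nat) : Int) 0
      = acc + (cm:Int) * s.getD (cm - 1 + cm*j) 0 := by
    intro acc j _
    rw [PySem.List.pyGetD_natCast]
  rw [List.foldl_map]
  rw [PySem.List.foldl_congr_mem _ _
    (fun acc j => acc + ((cm:Int)) * s.getD (cm - 1 + cm*j) 0) _ hstepB]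
  rw [PySem.List.foldl_add, PySem.List.foldl_add]
  congr 1
  rw [List.range_succ, List.map_append, List.sum_append]
  simp only [List.map_cons, List.map_nil, List.sum_cons, List.sum_nil]
  rw [if_neg (by omega), add_zero, add_zero]
  apply congrArg
  apply List.map_congr_left
  intro j hj
  rw [if_pos (List.mem_range.mp hj)]

lemma main_neg (k m : Int) (score : List Int) (hm : m < 0) :
    solution k m score = solution_alt k m score := by
  have hlen : (0:Int) ≤ (score.length : Int) := Int.natCast_nonneg _
  have hA : PySem.List.pyRange 0 ((score.length : Int) + 1) m = [] :=
    pyRange_nil_of_neg _ _ _ hm (by omega)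
  have hB : PySem.List.pyRange (m - 1) ((score.length : Int)) m = [] :=
    pyRange_nil_of_neg _ _ _ hm (by omega)
  simp [solution, solution_alt, hA, hB]

-- ===== VERDICT (by name: the statement is the Claim_ definition above) =====
theorem solution_spec : Claim_equal_solution := by
  intro k m score _ hm
  unfold Spec_solution
  rcases lt_or_gt_of_ne (hm : m ≠ 0) with h | h
  · exact (main_neg k m score h).symm ▸ rfl
  · exact (main_pos k m score h).symm ▸ rfl
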